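-- pv_equiv track=rewrite | github.com/benoitrolland/srtToFullSentences | srtToFullSentences.py | count_syllables_french
-- ===== SOURCE A (Python) =====
-- def count_syllables_french(word):
--     word = word.lower()
--     count = 0
--     vowels = 'aeiouyàâäéèêëîïôöùûü'
--     if word[0] in vowels:
--         count += 1
--     for index in range(1, len(word)):
--         if word[index] in vowels and word[index - 1] not in vowels:
--             count += 1
--     if word.endswith('e'):
--         count -= 1
--     if word.endswith('es'):
--         count -= 1
--     if word.endswith('ent'):
--         count -= 1
--     if count <= 0:
--         count = 1
--     return count
-- ===== SOURCE B (Python) =====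
-- def count_syllables_french(word):
--     word = word.lower()
--     vowels = 'aeiouyàâäéèêëîïôöùûü'
--     spaced = ''.join(c if c in vowels else ' ' for c in word)
--     count = len(spaced.split())
--     if word.endswith('e'):
--         count -= 1
--     if word.endswith('es'):
--         count -= 1
--     if word.endswith('ent'):
--         count -= 1
--     return count if count > 0 else 1
-- ===== Notes on version B (the rewrite author's own statement) =====
-- stated objective: idiomatic
-- what changed: B counts vowel groups by masking non-vowels to spaces and splitting, instead of A's index-transition scan over word[i]/word[i-1]; suffix subtractions and the clamp stay.
import Mathlib
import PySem

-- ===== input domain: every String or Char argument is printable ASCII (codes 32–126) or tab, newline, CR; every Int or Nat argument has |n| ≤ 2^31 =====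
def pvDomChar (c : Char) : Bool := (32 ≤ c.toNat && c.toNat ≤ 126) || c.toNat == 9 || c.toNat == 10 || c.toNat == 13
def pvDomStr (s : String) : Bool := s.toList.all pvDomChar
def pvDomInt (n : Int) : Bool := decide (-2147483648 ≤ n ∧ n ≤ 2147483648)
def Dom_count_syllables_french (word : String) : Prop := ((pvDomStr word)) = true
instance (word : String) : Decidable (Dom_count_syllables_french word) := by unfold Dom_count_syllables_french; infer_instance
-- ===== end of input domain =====

-- B counts vowel groups by masking non-vowels to spaces and splitting, instead of A's
-- index-transition scan; same suffix subtractions and clamp. (Return values only.)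

def csfVowels : List Char :=
  ['a','e','i','o','u','y','à','â','ä','é','è','ê','ë','î','ï','ô','ö','ù','û','ü']

-- ===== PORT A =====
def count_syllables_french (word : String) : Int :=
  let w := PySem.Chars.lower word.toList
  let count : Int := if PySem.List.pyGetD w 0 ' ' ∈ csfVowels then 1 else 0
  let count :=
    (PySem.List.pyRange 1 (PySem.Chars.len w) 1).foldl
      (fun c i =>
        if PySem.List.pyGetD w i ' ' ∈ csfVowels ∧ PySem.List.pyGetD w (i - 1) ' ' ∉ csfVowels
        then c + 1 else c) count
  let count := if PySem.Chars.endswith w "e".toList then count - 1 else count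
  let count := if PySem.Chars.endswith w "es".toList then count - 1 else count
  let count := if PySem.Chars.endswith w "ent".toList then count - 1 else count
  if count ≤ 0 then 1 else count

-- ===== PORT B =====
def count_syllables_french_alt (word : String) : Int :=
  let w := PySem.Chars.lower word.toList
  let spaced := w.map (fun c => if c ∈ csfVowels then c else ' ')
  let count : Int := (PySem.Chars.split₀ spaced).length
  let count := if PySem.Chars.endswith w "e".toList then count - 1 else count
  let count := if PySem.Chars.endswith w "es".toList then count - 1 else count
  let count := if PySem.Chars.endswith w "ent".toList then count - 1 else count
  if count > 0 then count else 1

-- ===== PRECONDITION & SPEC =====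
-- Pre_ excludes only the empty string, on which A raises IndexError (word[0]).
def Pre_count_syllables_french (word : String) : Prop := word ≠ ""
instance (word : String) : Decidable (Pre_count_syllables_french word) := by
  unfold Pre_count_syllables_french; infer_instance

def pvWitness_count_syllables_french : String := "bonjour"

def Spec_count_syllables_french (word : String) (out : Int) : Prop :=
  out = count_syllables_french_alt word
instance (word : String) (out : Int) : Decidable (Spec_count_syllables_french word out) := by
  unfold Spec_count_syllables_french; infer_instance

-- ===== CLAIM (what is proved, stated in full; the proofs are below) =====
def Claim_equal_count_syllables_french : Prop :=
  ∀ (word : String), Dom_count_syllables_french word → Pre_count_syllables_french word →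
    Spec_count_syllables_french word (count_syllables_french word)

-- ===== LEMMAS AND PROOFS =====

-- number of i ≥ 1 with v(l[i]) true and v(l[i-1]) false, given the previous flag
def csfStarts : Bool → List Bool → Int
  | _, [] => 0
  | prev, b :: t => (if b ∧ ¬prev then 1 else 0) + csfStarts b t

-- number of maximal runs of `true`, given whether a run is currently open
def csfGroups : Bool → List Bool → Int
  | b, [] => if b then 1 else 0
  | b, false :: t => (if b then 1 else 0) + csfGroups false t
  | _, true :: t => csfGroups true t

lemma csfGroups_eq_starts (l : List Bool) (b : Bool) :
    csfGroups b l = csfStarts b l + (if b then 1 else 0) := by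
  induction l generalizing b with
  | nil => simp [csfGroups, csfStarts]
  | cons h t ih =>
    cases h <;> cases b <;> simp [csfGroups, csfStarts, ih] <;> ring

lemma csfVowels_not_space : ∀ c ∈ csfVowels, PySem.Chars.isspace c = false := by
  intro c hc; fin_cases hc <;> rfl

-- split₀.go on a masked list counts the runs of vowels
lemma csf_go_len (w : List Char) (cur : List Char) (acc : List (List Char)) :
    ((PySem.Chars.split₀.go (w.map (fun c => if c ∈ csfVowels then c else ' ')) cur acc).length : Int)
      = acc.length + csfGroups (!cur.isEmpty) (w.map (· ∈ csfVowels)) := by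
  induction w generalizing cur acc with
  | nil =>
    by_cases h : cur.isEmpty <;>
      simp [PySem.Chars.split₀.go, h, csfGroups]
  | cons c t ih =>
    by_cases hv : c ∈ csfVowels
    · have hs : PySem.Chars.isspace c = false := csfVowels_not_space c hv
      simp only [List.map_cons, if_pos hv, PySem.Chars.split₀.go, hs, Bool.false_eq_true,
        if_false]
      rw [ih (c :: cur) acc]
      simp [csfGroups, hv]
    · simp only [List.map_cons, if_neg hv, PySem.Chars.split₀.go]
      have hs : PySem.Chars.isspace ' ' = true := by decide
      rw [if_pos hs]
      by_cases hc : cur.isEmpty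
      · rw [if_pos hc, ih [] acc]
        simp [csfGroups, hv, hc]
      · rw [if_neg hc, ih [] (cur.reverse :: acc)]
        simp [csfGroups, hv, hc]
        ring

-- A's index loop, rephrased over Nat ranges
lemma csf_scan (t : List Char) (x : Char) (c : Int) :
    (List.range t.length).foldl
        (fun c k =>
          if (x :: t).getD (k + 1) ' ' ∈ csfVowels ∧ (x :: t).getD k ' ' ∉ csfVowels
          then c + 1 else c) c
      = c + csfStarts (x ∈ csfVowels) (t.map (· ∈ csfVowels)) := by
  induction t generalizing x c with
  | nil => simp [csfStarts]
  | cons y t ih =>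
    simp only [List.length_cons]
    rw [List.range_succ_eq_map, List.foldl_cons, List.foldl_map]
    simp only [List.getD_cons_succ, List.getD_cons_zero]
    have := ih y (if y ∈ csfVowels ∧ x ∉ csfVowels then c + 1 else c)
    simp only [List.getD_cons_succ] at this ⊢
    rw [this]
    simp only [List.map_cons, csfStarts]
    split_ifs <;> simp_all <;> ring

lemma csf_pyfold (w : List Char) (hw : w ≠ []) (c : Int) :
    (PySem.List.pyRange 1 (PySem.Chars.len w) 1).foldl
        (fun c i =>
          if PySem.List.pyGetD w i ' ' ∈ csfVowels ∧ PySem.List.pyGetD w (i - 1) ' ' ∉ csfVowels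
          then c + 1 else c) c
      = c + csfStarts (w.headD ' ' ∈ csfVowels) ((w.drop 1).map (· ∈ csfVowels)) := by
  obtain ⟨x, t, rfl⟩ : ∃ x t, w = x :: t := by
    cases w with | nil => exact absurd rfl hw | cons x t => exact ⟨x, t, rfl⟩
  have hlen : PySem.Chars.len (x :: t) = ((t.length + 1 : Nat) : Int) := by
    simp [PySem.Chars.len]
  rw [hlen, PySem.List.pyRange_one, List.foldl_map]
  have hrange : ((((t.length + 1 : Nat) : Int)) - 1).toNat = t.length := by omega
  rw [hrange]
  have hfun : (fun (c : Int) (k : Nat) =>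
      if PySem.List.pyGetD (x :: t) (1 + (k : Int)) ' ' ∈ csfVowels ∧
         PySem.List.pyGetD (x :: t) (1 + (k : Int) - 1) ' ' ∉ csfVowels then c + 1 else c)
      = (fun (c : Int) (k : Nat) =>
      if (x :: t).getD (k + 1) ' ' ∈ csfVowels ∧ (x :: t).getD k ' ' ∉ csfVowels
      then c + 1 else c) := by
    funext c' k
    have h2 : (1 : Int) + (k : Int) - 1 = ((k : Nat) : Int) := by omega
    have h1 : (1 : Int) + (k : Int) = ((k + 1 : Nat) : Int) := by push_cast; ring
    rw [h2, PySem.List.pyGetD_natCast, h1, PySem.List.pyGetD_natCast]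
  rw [hfun]
  exact csf_scan t x c

-- ===== VERDICT (by name: the statement is the Claim_ definition above) =====
theorem count_syllables_french_spec : Claim_equal_count_syllables_french := by
  intro word _ hpre
  unfold Spec_count_syllables_french count_syllables_french count_syllables_french_alt
  have hw : PySem.Chars.lower word.toList ≠ [] := by
    intro h
    apply hpre
    have : word.toList = [] := by simpa [PySem.Chars.lower] using h
    exact String.toList_eq_nil_iff.mp this
  revert hw
  generalize PySem.Chars.lower word.toList = w
  intro hw
  have key : (PySem.List.pyRange 1 (PySem.Chars.len w) 1).foldl
        (fun c i =>
          if PySem.List.pyGetD w i ' ' ∈ csfVowels ∧ PySem.List.pyGetD w (i - 1) ' ' ∉ csfVowels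
          then c + 1 else c)
        (if PySem.List.pyGetD w 0 ' ' ∈ csfVowels then (1 : Int) else 0)
      = ((PySem.Chars.split₀ (w.map (fun c => if c ∈ csfVowels then c else ' '))).length : Int) := by
    rw [csf_pyfold w hw]
    simp only [PySem.Chars.split₀]
    rw [csf_go_len w [] []]
    obtain ⟨x, t, rfl⟩ : ∃ x t, w = x :: t := by
      cases hq : w with
      | nil => exact absurd hq hw
      | cons x t => exact ⟨x, t, rfl⟩
    simp only [List.headD_cons, List.drop_one, List.tail_cons, List.isEmpty_nil, Bool.not_true,
      List.length_nil, Nat.cast_zero, zero_add, List.map_cons]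
    rw [csfGroups_eq_starts]
    simp only [Bool.false_eq_true, if_false, add_zero, csfStarts]
    have h0 : PySem.List.pyGetD (x :: t) 0 ' ' = x := by
      simp [PySem.List.pyGetD, PySem.List.pyGet?, PySem.List.pyIdx?]
    rw [h0]
    by_cases hv : x ∈ csfVowels <;> simp [hv]
  simp only []
  rw [key]
  split_ifs <;> omega
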